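-- pv_equiv track=rewrite | github.com/rindo57/anidl720p | main/modules/utils.py | format_text
-- ===== SOURCE A (Python) =====
-- from string import ascii_letters, ascii_uppercase, digits
--
-- def format_text(text):
--     ftext = ""
--     for x in text:
--         if x in ascii_letters or x == " " or x in digits:
--             ftext += x
--         else:
--             ftext += " "
--
--     while "  " in ftext:
--         ftext = ftext.replace("  "," ")
--     return ftext
-- ===== SOURCE B (Python) =====
-- from string import ascii_letters, digits
--
-- def format_text(text):
--     out = []
--     last_space = False
--     for ch in text:
--         if ch in ascii_letters or ch == " " or ch in digits:
--             y = ch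
--         else:
--             y = " "
--         if y == " " and last_space:
--             continue
--         out.append(y)
--         last_space = (y == " ")
--     return "".join(out)
-- ===== Notes on version B (the rewrite author's own statement) =====
-- stated objective: alternative
-- what changed: B replaces A's transform pass plus repeated whole-string double-space-replace rescans with a single stateful left-to-right scan that maps each char and skips a space when the last emitted char was a space.
import Mathlib
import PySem

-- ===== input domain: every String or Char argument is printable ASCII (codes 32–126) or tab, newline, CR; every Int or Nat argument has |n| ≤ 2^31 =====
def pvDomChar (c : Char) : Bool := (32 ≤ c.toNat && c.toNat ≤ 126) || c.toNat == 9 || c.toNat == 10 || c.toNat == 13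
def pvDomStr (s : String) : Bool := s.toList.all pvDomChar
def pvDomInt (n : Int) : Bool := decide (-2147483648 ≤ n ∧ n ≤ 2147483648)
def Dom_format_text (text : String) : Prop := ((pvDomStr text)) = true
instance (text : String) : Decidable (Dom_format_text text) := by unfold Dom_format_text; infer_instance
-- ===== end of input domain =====

-- B replaces A's transform pass and repeated double-space-replace loop by one stateful left-to-right scan; return values proved equal.

-- string.ascii_letters and string.digits (shared character-class constants)
def pvAsciiLetters : List Char := "abcdefghijklmnopqrstuvwxyzABCDEFGHIJKLMNOPQRSTUVWXYZ".toList
def pvDigits : List Char := "0123456789".toList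

-- ===== PORT A =====
-- termination helpers for A's `while "  " in ftext` loop (cited by the port's decreasing_by)
-- pvRep l = what one pass of ftext.replace("  ", " ") produces (characterisation of PySem.Chars.replace)
def pvRep : List Char → List Char
  | [] => []
  | [c] => [c]
  | a :: b :: t => if a = ' ' ∧ b = ' ' then ' ' :: pvRep t else a :: pvRep (b :: t)

theorem pvReplace_go_eq (fuel : Nat) (l acc : List Char) (h : l.length ≤ fuel) :
    PySem.Chars.replace.go [' ', ' '] [' '] fuel l acc = acc.reverse ++ pvRep l := by
  induction fuel generalizing l acc with
  | zero =>
    have : l = [] := List.eq_nil_of_length_eq_zero (Nat.le_zero.mp h)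
    subst this
    simp [PySem.Chars.replace.go, pvRep]
  | succ fuel ih =>
    match l with
    | [] => simp [PySem.Chars.replace.go, pvRep]
    | [c] =>
      have hpre : [' ', ' '].isPrefixOf [c] = false := by
        rcases Decidable.em (c = ' ') with h | h <;> simp [List.isPrefixOf, h]
      rw [PySem.Chars.replace.go]
      simp only [hpre]
      rw [ih [] (c :: acc) (by simp)]
      simp [pvRep]
    | a :: b :: t =>
      rw [PySem.Chars.replace.go]
      by_cases hab : a = ' ' ∧ b = ' '
      · obtain ⟨ha, hb⟩ := hab; subst ha; subst hb
        have hpre : [' ', ' '].isPrefixOf (' ' :: ' ' :: t) = true := by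
          simp [List.isPrefixOf]
        simp only [hpre, if_true]
        rw [show List.drop [' ', ' '].length (' ' :: ' ' :: t) = t from rfl]
        rw [ih t ([' '].reverse ++ acc) (by simp at h ⊢; omega)]
        simp [pvRep]
      · have hpre : [' ', ' '].isPrefixOf (a :: b :: t) = false := by
          by_cases ha : a = ' '
          · subst ha
            have hb : ¬ b = ' ' := fun hb => hab ⟨rfl, hb⟩
            simp [List.isPrefixOf]
            intro h'; exact hb h'.symm
          · simp [List.isPrefixOf]
            intro h'; exact absurd h'.symm ha
        simp only [hpre]
        rw [ih (b :: t) (a :: acc) (by simp at h ⊢; omega)]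
        simp [pvRep, hab]

theorem pvReplace_eq_rep (l : List Char) :
    PySem.Chars.replace l [' ', ' '] [' '] = pvRep l := by
  rw [PySem.Chars.replace]
  simp only [List.isEmpty]
  exact pvReplace_go_eq l.length l [] (le_refl _)

theorem pvRep_length_le (l : List Char) : (pvRep l).length ≤ l.length := by
  induction l using pvRep.induct with
  | case1 => simp [pvRep]
  | case2 c => simp [pvRep]
  | case3 a b t h ih => obtain ⟨ha, hb⟩ := h; subst ha; subst hb; simp [pvRep]; omega
  | case4 a b t hab ih => simp only [pvRep, if_neg hab]; simp at ih ⊢; omega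

theorem pvRep_length_lt (l : List Char) (h : [' ', ' '] <:+: l) :
    (pvRep l).length < l.length := by
  induction l using pvRep.induct with
  | case1 => simp at h
  | case2 c =>
    exfalso
    obtain ⟨s, t, hst⟩ := h
    have := congrArg List.length hst
    simp at this; omega
  | case3 a b t h' ih =>
    obtain ⟨ha, hb⟩ := h'; subst ha; subst hb
    have := pvRep_length_le t
    simp [pvRep]; omega
  | case4 a b t hab ih =>
    simp only [pvRep, if_neg hab, List.length_cons]
    have h' : [' ', ' '] <:+: (b :: t) := by
      rcases (List.infix_cons_iff).mp h with hpre | htail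
      · exfalso
        rcases hpre with ⟨r, hr⟩
        injection hr with h1 h2
        injection h2 with h3 h4
        exact hab ⟨h1.symm, h3.symm⟩
      · exact htail
    have := ih h'
    simp only [List.length_cons] at this ⊢
    omega

-- A's while-loop, literally: while "  " in ftext: ftext = ftext.replace("  ", " ")
def pvCollapseLoop (l : List Char) : List Char :=
  if PySem.Chars.isIn [' ', ' '] l then
    pvCollapseLoop (PySem.Chars.replace l [' ', ' '] [' '])
  else l
termination_by l.length
decreasing_by
  rw [pvReplace_eq_rep]
  exact pvRep_length_lt l ((PySem.Chars.isIn_iff_infix _ _).mp (by assumption))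

def format_text (text : String) : String :=
  let ftext := text.toList.foldl
    (fun acc x =>
      if pvAsciiLetters.contains x || x == ' ' || pvDigits.contains x then acc ++ [x]
      else acc ++ [' ']) []
  String.ofList (pvCollapseLoop ftext)

-- ===== PORT B =====
def format_text_alt (text : String) : String :=
  let st := text.toList.foldl
    (fun (st : List Char × Bool) ch =>
      let y := if pvAsciiLetters.contains ch || ch == ' ' || pvDigits.contains ch then ch else ' '
      if y == ' ' && st.2 then st
      else (st.1 ++ [y], y == ' '))
    ([], false)
  String.ofList st.1

-- ===== PRECONDITION & SPEC =====
def Spec_format_text (text : String) (out : String) : Prop := out = format_text_alt text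
instance (text : String) (out : String) : Decidable (Spec_format_text text out) := by unfold Spec_format_text; infer_instance

-- ===== CLAIM (what is proved, stated in full; the proofs are below) =====
def Claim_equal_format_text : Prop := ∀ (text : String), Dom_format_text text → Spec_format_text text (format_text text)

-- ===== LEMMAS AND PROOFS =====

-- the char-to-char transform both programs apply
def pvF (c : Char) : Char :=
  if pvAsciiLetters.contains c || c == ' ' || pvDigits.contains c then c else ' '

-- space-run squeezing with a "last emitted char was a space" flag
def pvSqueeze (prev : Bool) : List Char → List Char
  | [] => []
  | c :: t =>
    if c = ' ' then (if prev then pvSqueeze true t else ' ' :: pvSqueeze true t)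
    else c :: pvSqueeze false t

theorem pvSqueeze_rep (l : List Char) : ∀ prev, pvSqueeze prev (pvRep l) = pvSqueeze prev l := by
  induction l using pvRep.induct with
  | case1 => intro prev; simp [pvRep]
  | case2 c => intro prev; simp [pvRep]
  | case3 a b t h ih =>
    intro prev
    obtain ⟨ha, hb⟩ := h; subst ha; subst hb
    simp only [pvRep]
    by_cases hp : prev <;> simp [pvSqueeze, hp, ih]
  | case4 a b t hab ih =>
    intro prev
    simp only [pvRep, if_neg hab]
    by_cases ha : a = ' '
    · subst ha
      have hb : ¬ b = ' ' := fun hb => hab ⟨rfl, hb⟩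
      by_cases hp : prev <;> simp [pvSqueeze, hb, ih]
    · simp [pvSqueeze, ha, ih]

theorem pvSqueeze_fixed (l : List Char) (h : ¬ ([' ', ' '] <:+: l)) :
    pvSqueeze false l = l ∧ (l.head? ≠ some ' ' → pvSqueeze true l = l) := by
  induction l with
  | nil => simp [pvSqueeze]
  | cons c t ih =>
    have ht : ¬ ([' ', ' '] <:+: t) := fun h' => h (List.infix_cons h')
    obtain ⟨h1, h2⟩ := ih ht
    by_cases hc : c = ' '
    · subst hc
      have hhd : t.head? ≠ some ' ' := by
        intro hh
        cases t with
        | nil => simp at hh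
        | cons b t' =>
          simp at hh; subst hh
          exact h ⟨[], t', rfl⟩
      constructor
      · simp [pvSqueeze, h2 hhd]
      · intro hh; simp at hh
    · refine ⟨?_, fun _ => ?_⟩ <;> simp [pvSqueeze, hc, h1]

theorem pvCollapseLoop_eq (l : List Char) : pvCollapseLoop l = pvSqueeze false l := by
  induction l using pvCollapseLoop.induct with
  | case1 l hin ih =>
    rw [pvCollapseLoop, if_pos hin, ih, pvReplace_eq_rep, pvSqueeze_rep]
  | case2 l hin =>
    rw [pvCollapseLoop, if_neg hin]
    have h := (pvSqueeze_fixed l (fun h' => hin (by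
      rw [PySem.Chars.isIn_iff_infix]; exact h'))).1
    exact h.symm

-- A's first loop builds the mapped list
theorem pvMap_fold (l : List Char) (acc : List Char) :
    l.foldl (fun acc x =>
      if pvAsciiLetters.contains x || x == ' ' || pvDigits.contains x then acc ++ [x]
      else acc ++ [' ']) acc = acc ++ l.map pvF := by
  induction l generalizing acc with
  | nil => simp
  | cons c t ih =>
    simp only [List.foldl_cons, List.map_cons]
    by_cases hc : (pvAsciiLetters.contains c || c == ' ' || pvDigits.contains c) = true
    · have hf : pvF c = c := by unfold pvF; rw [if_pos hc]
      rw [if_pos hc, ih, hf]; simp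
    · have hf : pvF c = ' ' := by unfold pvF; rw [if_neg hc]
      rw [if_neg hc, ih, hf]; simp

-- B's fold computes the squeeze of the mapped list
theorem pvB_fold (l : List Char) (out : List Char) (prev : Bool) :
    (l.foldl (fun (st : List Char × Bool) ch =>
      if pvF ch == ' ' && st.2 then st
      else (st.1 ++ [pvF ch], pvF ch == ' ')) (out, prev)).1
      = out ++ pvSqueeze prev (l.map pvF) := by
  induction l generalizing out prev with
  | nil => simp [pvSqueeze]
  | cons c t ih =>
    rw [List.foldl_cons]
    by_cases hsp : pvF c = ' '
    · have hb : (pvF c == ' ') = true := by simp [hsp]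
      by_cases hp : prev
      · rw [if_pos (by simp [hb, hp])]
        rw [ih out prev]
        simp [pvSqueeze, hsp, hp]
      · have hp' : prev = false := by simpa using hp
        subst hp'
        rw [if_neg (by simp)]
        rw [ih (out ++ [pvF c]) (pvF c == ' ')]
        simp [pvSqueeze, hsp]
    · have hb : (pvF c == ' ') = false := by simp [hsp]
      rw [if_neg (by simp [hb])]
      rw [ih (out ++ [pvF c]) (pvF c == ' ')]
      simp [pvSqueeze, hsp, hb]

-- ===== VERDICT (by name: the statement is the Claim_ definition above) =====
theorem format_text_spec : Claim_equal_format_text := by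
  intro text _
  unfold Spec_format_text format_text format_text_alt
  simp only
  have hstep : (fun (st : List Char × Bool) ch =>
      let y := if pvAsciiLetters.contains ch || ch == ' ' || pvDigits.contains ch then ch else ' '
      if y == ' ' && st.2 then st
      else (st.1 ++ [y], y == ' '))
      = (fun (st : List Char × Bool) ch =>
      if pvF ch == ' ' && st.2 then st
      else (st.1 ++ [pvF ch], pvF ch == ' ')) := rfl
  rw [hstep, pvMap_fold, pvB_fold]
  simp [pvCollapseLoop_eq]
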